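-- pv_equiv track=rewrite | github.com/mgirardin/Project-Euler-Solutions | Solutions_Python/P026.py | cicle
-- ===== SOURCE A (Python) =====
-- def cicle(number):
--     if number == 1:
--         return 0
--     else:
--         n = 1
--         while True:
--             if (10**n - 1) % number == 0:
--                 break
--             n += 1
--         return n
-- ===== SOURCE B (Python) =====
-- def cicle(number):
--     # Running remainder r = 10**n % m, one modular multiplication per step,
--     # instead of recomputing the full power 10**n each iteration.
--     if number == 1:
--         return 0
--     m = abs(number)
--     target = 1 % m
--     r = 10 % m
--     n = 1
--     while r != target:
--         r = r * 10 % m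
--         n += 1
--     return n
-- ===== Notes on version B (the rewrite author's own statement) =====
-- stated objective: alternative
-- what changed: B keeps a running remainder r = 10^n mod |number| updated by one modular multiplication per step, instead of recomputing the arbitrary-precision power 10**n and taking % at every iteration.
import Mathlib
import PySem

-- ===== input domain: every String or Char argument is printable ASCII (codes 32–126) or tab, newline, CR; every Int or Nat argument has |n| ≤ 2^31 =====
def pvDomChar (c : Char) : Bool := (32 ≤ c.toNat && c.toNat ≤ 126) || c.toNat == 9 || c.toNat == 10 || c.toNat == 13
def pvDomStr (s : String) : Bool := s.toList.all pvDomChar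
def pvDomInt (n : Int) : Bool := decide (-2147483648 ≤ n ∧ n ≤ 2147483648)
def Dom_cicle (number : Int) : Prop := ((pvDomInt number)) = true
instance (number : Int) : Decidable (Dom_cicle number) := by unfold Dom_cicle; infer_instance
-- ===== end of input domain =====

-- B replaces A's recomputation of the full power 10**n each iteration by a running
-- remainder r = 10^n mod |number|; equal return values on all inputs where A returns.

-- ===== PORT A =====
-- A's 'while True' loop, fueled: under Pre_ the loop stops at the multiplicative
-- order of 10 mod |number|, which is ≤ |number|, so fuel |number|+1 is never exhausted.
def cicleLoopA (number : Int) : Nat → Int → Int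
  | 0, n => n
  | fuel + 1, n =>
      if PySem.Int.mod (10 ^ n.toNat - 1) number = 0 then n
      else cicleLoopA number fuel (n + 1)

def cicle (number : Int) : Int :=
  if number = 1 then 0
  else cicleLoopA number (number.natAbs + 1) 1

-- ===== PORT B =====
def cicleLoopB (m target : Int) : Nat → Int → Int → Int
  | 0, _, n => n
  | fuel + 1, r, n =>
      if r ≠ target then cicleLoopB m target fuel (PySem.Int.mod (r * 10) m) (n + 1)
      else n

def cicle_alt (number : Int) : Int :=
  if number = 1 then 0
  else
    let m := |number|
    let target := PySem.Int.mod 1 m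
    cicleLoopB m target (number.natAbs + 1) (PySem.Int.mod 10 m) 1

-- ===== PRECONDITION & SPEC =====
-- Pre_ excludes number = 0 (Python A raises ZeroDivisionError) and numbers not
-- coprime to 10 (A's 'while True' never finds 10^n ≡ 1 and diverges).
def Pre_cicle (number : Int) : Prop := number ≠ 0 ∧ Nat.gcd number.natAbs 10 = 1
instance (number : Int) : Decidable (Pre_cicle number) := by unfold Pre_cicle; infer_instance
def pvWitness_cicle : Int := 7

def Spec_cicle (number : Int) (out : Int) : Prop := out = cicle_alt number
instance (number : Int) (out : Int) : Decidable (Spec_cicle number out) := by unfold Spec_cicle; infer_instance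

-- ===== CLAIM (what is proved, stated in full; the proofs are below) =====
def Claim_equal_cicle : Prop := ∀ (number : Int), Dom_cicle number → Pre_cicle number → Spec_cicle number (cicle number)

-- ===== LEMMAS AND PROOFS =====

-- A's stopping test at counter n equals B's: (10^n - 1) % number = 0 ↔ 10^n % m = 1 % m, m = |number|.
theorem cond_equiv (number : Int) (h0 : number ≠ 0) (k : Nat) :
    (PySem.Int.mod (10 ^ k - 1) number = 0) ↔
      (PySem.Int.mod (10 ^ k : Int) |number| = PySem.Int.mod 1 |number|) := by
  have hm : (0 : Int) < |number| := abs_pos.mpr h0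
  rw [PySem.Int.mod_eq_zero_iff_dvd, PySem.Int.mod_eq_emod_of_pos hm,
    PySem.Int.mod_eq_emod_of_pos hm,
    Int.emod_eq_emod_iff_emod_sub_eq_zero, EuclideanDomain.mod_eq_zero, abs_dvd]

-- invariant step: (r * 10) % m = 10^(k+1) % m when r = 10^k % m
theorem step_inv (m : Int) (hm : 0 < m) (k : Nat) :
    PySem.Int.mod ((PySem.Int.mod (10 ^ k : Int) m) * 10) m = PySem.Int.mod (10 ^ (k + 1) : Int) m := by
  simp only [PySem.Int.mod_eq_emod_of_pos hm, pow_succ]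
  conv_rhs => rw [Int.mul_emod]
  rw [Int.mul_emod (10 ^ k % m) 10 m, Int.emod_emod_of_dvd _ (dvd_refl m)]

-- the two fueled loops agree whenever B's remainder carries the invariant
theorem loops_eq (number : Int) (h0 : number ≠ 0) :
    ∀ (fuel : Nat) (n : Int), 1 ≤ n →
      cicleLoopA number fuel n =
        cicleLoopB (|number|) (PySem.Int.mod 1 |number|) fuel
          (PySem.Int.mod (10 ^ n.toNat : Int) |number|) n := by
  intro fuel
  induction fuel with
  | zero => intro n _; rfl
  | succ f ih =>
      intro n hn
      simp only [cicleLoopA, cicleLoopB]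
      by_cases hc : PySem.Int.mod (10 ^ n.toNat - 1) number = 0
      · rw [if_pos hc]
        rw [(cond_equiv number h0 n.toNat).mp hc]
        simp
      · rw [if_neg hc]
        have hne : PySem.Int.mod (10 ^ n.toNat : Int) |number| ≠ PySem.Int.mod 1 |number| := by
          intro h; exact hc ((cond_equiv number h0 n.toNat).mpr h)
        rw [if_pos hne]
        have hm : (0 : Int) < |number| := abs_pos.mpr h0
        rw [step_inv _ hm]
        have ht : (n + 1).toNat = n.toNat + 1 := by omega
        rw [← ht]
        exact ih (n + 1) (by omega)

-- ===== VERDICT (by name: the statement is the Claim_ definition above) =====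
theorem cicle_spec : Claim_equal_cicle := by
  intro number _ hpre
  unfold Spec_cicle cicle cicle_alt
  by_cases h1 : number = 1
  · simp [h1]
  · rw [if_neg h1, if_neg h1]
    have h0 := hpre.1
    have := loops_eq number h0 (number.natAbs + 1) 1 (by omega)
    simpa using this
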